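-- pv_equiv track=rewrite | github.com/Foundup/Foundups-Agent | modules/infrastructure/doc_dae/src/doc_dae.py | _extract_module_hint
-- ===== SOURCE A (Python) =====
-- from typing import Dict, List, Any, Optional, Tuple
--
-- def _extract_module_hint(filename: str) -> Optional[str]:
--     """
--     Extract module hint from filename using pattern matching.
--     Examples:
--     - "Gemma3_YouTube_DAE_First_Principles_Analysis" -> youtube_dae
--     - "HoloIndex_MCP_ricDAE_Integration" -> holo_index
--     - "adaptive_router_wsp_integration_report" -> ric_dae
--     """
--     filename_lower = filename.lower()
--
--     # Pattern: ricDAE / Adaptive Router (check before general DAE)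
--     if any(x in filename_lower for x in ['ricdae', 'ric_dae', 'adaptive_router']):
--         return 'ric_dae'
--
--     # Pattern: YouTube DAE
--     if any(x in filename_lower for x in ['youtube', 'yt_dae', 'livechat', 'shorts']):
--         return 'youtube_dae'
--
--     # Pattern: HoloIndex / Qwen / Gemma
--     if any(x in filename_lower for x in ['holoindex', 'qwen', 'gemma', 'advisor']):
--         return 'holo_index'
--
--     # Pattern: Orphan analysis
--     if 'orphan' in filename_lower:
--         return 'orphan_analysis'
--
--     # Pattern: MCP / Gemini
--     if any(x in filename_lower for x in ['mcp', 'gemini']):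
--         return 'mcp_integration'
--
--     # Pattern: WSP / CodeIndex / Sentinel
--     if any(x in filename_lower for x in ['wsp', 'codeindex', 'sentinel']):
--         return 'wsp_framework'
--
--     # Pattern: DAE general (after specific DAE patterns)
--     if 'dae' in filename_lower:
--         return 'dae_infrastructure'
--
--     return None
-- ===== SOURCE B (Python) =====
-- from typing import Optional
--
-- # Flat keyword table with explicit priorities; one pass computes the
-- # minimum-priority matching keyword (argmin) instead of A's ordered
-- # early-return rule checks.
-- _KEYWORDS = [
--     ('ricdae', 0, 'ric_dae'), ('ric_dae', 0, 'ric_dae'), ('adaptive_router', 0, 'ric_dae'),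
--     ('youtube', 1, 'youtube_dae'), ('yt_dae', 1, 'youtube_dae'),
--     ('livechat', 1, 'youtube_dae'), ('shorts', 1, 'youtube_dae'),
--     ('holoindex', 2, 'holo_index'), ('qwen', 2, 'holo_index'),
--     ('gemma', 2, 'holo_index'), ('advisor', 2, 'holo_index'),
--     ('orphan', 3, 'orphan_analysis'),
--     ('mcp', 4, 'mcp_integration'), ('gemini', 4, 'mcp_integration'),
--     ('wsp', 5, 'wsp_framework'), ('codeindex', 5, 'wsp_framework'),
--     ('sentinel', 5, 'wsp_framework'),
--     ('dae', 6, 'dae_infrastructure'),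
-- ]
--
-- def _extract_module_hint(filename: str) -> Optional[str]:
--     fl = filename.lower()
--     best = None
--     for kw, prio, label in _KEYWORDS:
--         if kw in fl and (best is None or prio < best[0]):
--             best = (prio, label)
--     return best[1] if best is not None else None
-- ===== Notes on version B (the rewrite author's own statement) =====
-- stated objective: alternative
-- what changed: Replaced A's ordered early-return rule checks with a single pass over a flat priority-tagged keyword table that keeps an argmin (best matching priority) accumulator and never returns early.
import Mathlib
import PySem

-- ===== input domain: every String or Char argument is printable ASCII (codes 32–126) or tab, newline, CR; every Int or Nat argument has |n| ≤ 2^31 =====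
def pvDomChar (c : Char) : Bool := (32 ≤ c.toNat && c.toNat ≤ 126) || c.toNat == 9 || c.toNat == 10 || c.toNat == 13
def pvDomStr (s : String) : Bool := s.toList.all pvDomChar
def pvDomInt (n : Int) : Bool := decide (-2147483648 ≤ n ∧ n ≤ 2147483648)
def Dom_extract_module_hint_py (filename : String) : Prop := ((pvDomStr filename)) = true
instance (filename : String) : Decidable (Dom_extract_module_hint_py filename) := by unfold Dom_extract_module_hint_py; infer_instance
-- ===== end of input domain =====

-- B replaces A's ordered early-return rule checks by a one-pass argmin over a flat priority-tagged keyword table (alternative decomposition).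


-- ===== PORT A =====
def extract_module_hint_py (filename : String) : Option String :=
  let filename_lower := PySem.Str.lower filename
  if (["ricdae", "ric_dae", "adaptive_router"] : List String).any
      (fun x => PySem.Str.isIn x filename_lower) then some "ric_dae"
  else if (["youtube", "yt_dae", "livechat", "shorts"] : List String).any
      (fun x => PySem.Str.isIn x filename_lower) then some "youtube_dae"
  else if (["holoindex", "qwen", "gemma", "advisor"] : List String).any
      (fun x => PySem.Str.isIn x filename_lower) then some "holo_index"
  else if PySem.Str.isIn "orphan" filename_lower then some "orphan_analysis"
  else if (["mcp", "gemini"] : List String).any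
      (fun x => PySem.Str.isIn x filename_lower) then some "mcp_integration"
  else if (["wsp", "codeindex", "sentinel"] : List String).any
      (fun x => PySem.Str.isIn x filename_lower) then some "wsp_framework"
  else if PySem.Str.isIn "dae" filename_lower then some "dae_infrastructure"
  else none

-- ===== PORT B =====
def pvKeywords : List (String × Nat × String) :=
  [ ("ricdae", 0, "ric_dae"), ("ric_dae", 0, "ric_dae"), ("adaptive_router", 0, "ric_dae"),
    ("youtube", 1, "youtube_dae"), ("yt_dae", 1, "youtube_dae"),
    ("livechat", 1, "youtube_dae"), ("shorts", 1, "youtube_dae"),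
    ("holoindex", 2, "holo_index"), ("qwen", 2, "holo_index"),
    ("gemma", 2, "holo_index"), ("advisor", 2, "holo_index"),
    ("orphan", 3, "orphan_analysis"),
    ("mcp", 4, "mcp_integration"), ("gemini", 4, "mcp_integration"),
    ("wsp", 5, "wsp_framework"), ("codeindex", 5, "wsp_framework"),
    ("sentinel", 5, "wsp_framework"),
    ("dae", 6, "dae_infrastructure") ]

-- loop body of Source B's for-loop: update `best` if keyword matched and priority improves
def pvStep (p : Nat) (l : String) (k : Bool) (s : Option (Nat × String)) : Option (Nat × String) :=
  if k && (match s with | none => true | some b => decide (p < b.1)) then some (p, l) else s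

def extract_module_hint_py_alt (filename : String) : Option String :=
  let fl := PySem.Str.lower filename
  let best := pvKeywords.foldl
    (fun (best : Option (Nat × String)) t => pvStep t.2.1 t.2.2 (PySem.Str.isIn t.1 fl) best) none
  best.map (·.2)

-- ===== PRECONDITION & SPEC =====
def Spec_extract_module_hint_py (filename : String) (out : Option String) : Prop := out = extract_module_hint_py_alt filename
instance (filename : String) (out : Option String) : Decidable (Spec_extract_module_hint_py filename out) := by unfold Spec_extract_module_hint_py; infer_instance

-- ===== CLAIM (what is proved, stated in full; the proofs are below) =====
def Claim_equal_extract_module_hint_py : Prop := ∀ (filename : String), Dom_extract_module_hint_py filename → Spec_extract_module_hint_py filename (extract_module_hint_py filename)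

-- ===== LEMMAS AND PROOFS =====

-- merging two consecutive loop steps that carry the same (priority, label)
theorem pvStep_merge (p : Nat) (l : String) (k1 k2 : Bool) (s : Option (Nat × String)) :
    pvStep p l k2 (pvStep p l k1 s) = pvStep p l (k1 || k2) s := by
  cases s with
  | none => cases k1 <;> cases k2 <;> simp [pvStep]
  | some b => by_cases h : p < b.1 <;> cases k1 <;> cases k2 <;> simp [pvStep, h]

-- ===== VERDICT (by name: the statement is the Claim_ definition above) =====
theorem extract_module_hint_py_spec : Claim_equal_extract_module_hint_py := by
  intro filename _
  unfold Spec_extract_module_hint_py extract_module_hint_py extract_module_hint_py_alt pvKeywords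
  simp only [List.foldl, List.any_cons, List.any_nil, Bool.or_false]
  generalize PySem.Str.isIn "ricdae" (PySem.Str.lower filename) = k1
  generalize PySem.Str.isIn "ric_dae" (PySem.Str.lower filename) = k2
  generalize PySem.Str.isIn "adaptive_router" (PySem.Str.lower filename) = k3
  generalize PySem.Str.isIn "youtube" (PySem.Str.lower filename) = k4
  generalize PySem.Str.isIn "yt_dae" (PySem.Str.lower filename) = k5
  generalize PySem.Str.isIn "livechat" (PySem.Str.lower filename) = k6
  generalize PySem.Str.isIn "shorts" (PySem.Str.lower filename) = k7
  generalize PySem.Str.isIn "holoindex" (PySem.Str.lower filename) = k8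
  generalize PySem.Str.isIn "qwen" (PySem.Str.lower filename) = k9
  generalize PySem.Str.isIn "gemma" (PySem.Str.lower filename) = k10
  generalize PySem.Str.isIn "advisor" (PySem.Str.lower filename) = k11
  generalize PySem.Str.isIn "orphan" (PySem.Str.lower filename) = k12
  generalize PySem.Str.isIn "mcp" (PySem.Str.lower filename) = k13
  generalize PySem.Str.isIn "gemini" (PySem.Str.lower filename) = k14
  generalize PySem.Str.isIn "wsp" (PySem.Str.lower filename) = k15
  generalize PySem.Str.isIn "codeindex" (PySem.Str.lower filename) = k16
  generalize PySem.Str.isIn "sentinel" (PySem.Str.lower filename) = k17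
  generalize PySem.Str.isIn "dae" (PySem.Str.lower filename) = k18
  simp only [pvStep_merge, Bool.or_assoc]
  generalize hb1 : (k1 || (k2 || (k3)) : Bool) = b1
  generalize hb2 : (k4 || (k5 || (k6 || (k7))) : Bool) = b2
  generalize hb3 : (k8 || (k9 || (k10 || (k11))) : Bool) = b3
  generalize hb5 : (k13 || (k14) : Bool) = b5
  generalize hb6 : (k15 || (k16 || (k17)) : Bool) = b6
  clear hb1 hb2 hb3 hb5 hb6
  revert b1 b2 b3 b5 b6 k12 k18
  decide
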